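-- pv_equiv track=rewrite | github.com/comchobo/Capturing-Perplexing-Named-Entities | pruning_functions.py | fix_indices
-- ===== SOURCE A (Python) =====
-- def fix_indices(index_list, string_list):
--     new_index_list = []
--     curr_start = index_list[0][0]
--     curr_end = index_list[0][1]
--
--     for i in range(1, len(index_list)):
--         if string_list[i][0] != ' ' and curr_end == index_list[i][0]:
--             curr_end = index_list[i][1]
--         else:
--             new_index_list.append([curr_start, curr_end])
--             curr_start = index_list[i][0]
--             curr_end = index_list[i][1]
--
--     new_index_list.append([curr_start, curr_end])
--     return new_index_list
-- ===== SOURCE B (Python) =====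
-- def fix_indices(index_list, string_list):
--     n = len(index_list)
--     # group starts: a new group begins at i iff the token starts with a space
--     # or the previous range does not end where this one starts
--     starts = [0] + [i for i in range(1, n)
--                     if string_list[i][0] == ' ' or index_list[i - 1][1] != index_list[i][0]]
--     ends = starts[1:] + [n]
--     return [[index_list[s][0], index_list[e - 1][1]] for s, e in zip(starts, ends)]
-- ===== Notes on version B (the rewrite author's own statement) =====
-- stated objective: alternative
-- what changed: Instead of a running (curr_start, curr_end) accumulator, B exploits that curr_end always equals index_list[i-1][1], computes the list of group-start boundaries with one local test per position, and then emits one [start, end] pair per consecutive boundary pair.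
import Mathlib
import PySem

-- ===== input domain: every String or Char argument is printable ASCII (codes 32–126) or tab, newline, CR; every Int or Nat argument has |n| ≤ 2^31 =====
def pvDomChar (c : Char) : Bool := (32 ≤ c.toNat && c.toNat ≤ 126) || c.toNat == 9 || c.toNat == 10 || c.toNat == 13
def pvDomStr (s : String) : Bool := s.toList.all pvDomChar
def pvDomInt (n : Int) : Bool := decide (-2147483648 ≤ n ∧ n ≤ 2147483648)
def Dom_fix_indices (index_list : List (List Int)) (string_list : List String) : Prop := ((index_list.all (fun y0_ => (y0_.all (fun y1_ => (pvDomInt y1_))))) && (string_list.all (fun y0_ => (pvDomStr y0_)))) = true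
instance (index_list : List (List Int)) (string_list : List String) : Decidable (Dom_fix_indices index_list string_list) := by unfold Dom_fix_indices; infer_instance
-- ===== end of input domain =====

-- B rebuilds the result from the local boundary condition (a group starts at i iff the
-- token starts with a space or range i-1 does not end where range i starts) instead of
-- carrying a running (curr_start, curr_end) accumulator; objective: alternative decomposition.

-- shared Python-indexing accessors: xs[i][j] and string_list[i][0]
def pvGet2 (xs : List (List Int)) (i j : Int) : Int :=
  (PySem.List.pyGet? ((PySem.List.pyGet? xs i).getD []) j).getD 0

def pvHead (ss : List String) (i : Int) : Char :=
  (PySem.List.pyGet? ((PySem.List.pyGet? ss i).getD "").toList 0).getD ' '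

-- ===== PORT A =====
def fix_indices (index_list : List (List Int)) (string_list : List String) : List (List Int) :=
  let st := (PySem.List.pyRange 1 (index_list.length : Int)).foldl
    (fun (s : List (List Int) × Int × Int) i =>
      if pvHead string_list i ≠ ' ' ∧ s.2.2 = pvGet2 index_list i 0 then
        (s.1, s.2.1, pvGet2 index_list i 1)
      else
        (s.1 ++ [[s.2.1, s.2.2]], pvGet2 index_list i 0, pvGet2 index_list i 1))
    ([], pvGet2 index_list 0 0, pvGet2 index_list 0 1)
  st.1 ++ [[st.2.1, st.2.2]]

-- ===== PORT B =====
-- a new group begins at i iff string_list[i][0] == ' ' or index_list[i-1][1] != index_list[i][0]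
def pvNewGroup (index_list : List (List Int)) (string_list : List String) (i : Int) : Bool :=
  pvHead string_list i == ' ' || pvGet2 index_list (i - 1) 1 != pvGet2 index_list i 0

def fix_indices_alt (index_list : List (List Int)) (string_list : List String) : List (List Int) :=
  let n : Int := index_list.length
  let starts : List Int :=
    0 :: (PySem.List.pyRange 1 n).filter (pvNewGroup index_list string_list)
  let ends : List Int := starts.tail ++ [n]
  (starts.zip ends).map (fun p => [pvGet2 index_list p.1 0, pvGet2 index_list (p.2 - 1) 1])

-- ===== PRECONDITION & SPEC =====
-- Pre_ excludes exactly the inputs where Python A raises IndexError: empty index_list,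
-- an inner list with fewer than two entries, or (when the loop runs) a too-short
-- string_list or an empty string among string_list[1..len(index_list)-1].
def Pre_fix_indices (index_list : List (List Int)) (string_list : List String) : Prop :=
  index_list ≠ [] ∧ (∀ l ∈ index_list, 2 ≤ l.length) ∧
  (index_list.length = 1 ∨
    (index_list.length ≤ string_list.length ∧
      ∀ s ∈ (string_list.take index_list.length).drop 1, s ≠ ""))
instance (index_list : List (List Int)) (string_list : List String) : Decidable (Pre_fix_indices index_list string_list) := by unfold Pre_fix_indices; infer_instance

def pvWitness_fix_indices : List (List Int) × List String := ([[0, 2], [2, 4]], ["ab", "cd"])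

def Spec_fix_indices (index_list : List (List Int)) (string_list : List String) (out : List (List Int)) : Prop := out = fix_indices_alt index_list string_list
instance (index_list : List (List Int)) (string_list : List String) (out : List (List Int)) : Decidable (Spec_fix_indices index_list string_list out) := by unfold Spec_fix_indices; infer_instance

-- ===== CLAIM (what is proved, stated in full; the proofs are below) =====
def Claim_equal_fix_indices : Prop := ∀ (index_list : List (List Int)) (string_list : List String), Dom_fix_indices index_list string_list → Pre_fix_indices index_list string_list → Spec_fix_indices index_list string_list (fix_indices index_list string_list)


-- ===== LEMMAS AND PROOFS =====

-- proof-side names for A's loop body and loop finisher (definitionally equal to the port's inline code)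
def pvStepA (idxs : List (List Int)) (strs : List String)
    (s : List (List Int) × Int × Int) (i : Int) : List (List Int) × Int × Int :=
  if pvHead strs i ≠ ' ' ∧ s.2.2 = pvGet2 idxs i 0 then
    (s.1, s.2.1, pvGet2 idxs i 1)
  else
    (s.1 ++ [[s.2.1, s.2.2]], pvGet2 idxs i 0, pvGet2 idxs i 1)

def pvFin (st : List (List Int) × Int × Int) : List (List Int) :=
  st.1 ++ [[st.2.1, st.2.2]]

-- the grouped output, parametrised by the list of boundary indices
def pvBuild (idxs : List (List Int)) (nm1 cs : Int) : List Int → List (List Int)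
  | [] => [[cs, pvGet2 idxs nm1 1]]
  | b :: rest => [cs, pvGet2 idxs (b - 1) 1] :: pvBuild idxs nm1 (pvGet2 idxs b 0) rest

theorem pyRange_self (a : Int) : PySem.List.pyRange a a = [] := by
  cases he : PySem.List.pyRange a a with
  | nil => rfl
  | cons x xs =>
    have hx : x ∈ PySem.List.pyRange a a := by rw [he]; exact List.mem_cons_self
    have := (PySem.List.mem_pyRange_one).mp hx
    omega

-- A's loop from index j onward, with the invariant curr_end = index_list[j-1][1],
-- produces exactly the groups delimited by the boundary indices ≥ j
theorem buildA (idxs : List (List Int)) (strs : List String) (n : Int) (hn : n = idxs.length) :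
    ∀ (k : Nat) (j : Int), j + k = n → 1 ≤ j → ∀ (acc : List (List Int)) (cs : Int),
    pvFin ((PySem.List.pyRange j n).foldl (pvStepA idxs strs)
        (acc, cs, pvGet2 idxs (j - 1) 1))
    = acc ++ pvBuild idxs (n - 1) cs
        ((PySem.List.pyRange j n).filter (pvNewGroup idxs strs)) := by
  intro k
  induction k with
  | zero =>
    intro j hj h1 acc cs
    have hjn : j = n := by omega
    subst hjn
    rw [pyRange_self]
    simp [pvFin, pvBuild]
  | succ m ih =>
    intro j hj h1 acc cs
    have hlt : j < n := by omega
    rw [PySem.List.pyRange_one_cons hlt]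
    by_cases hb : pvHead strs j = ' ' ∨ pvGet2 idxs (j - 1) 1 ≠ pvGet2 idxs j 0
    · -- new group at j
      have hbool : pvNewGroup idxs strs j = true := by
        simp [pvNewGroup]
        tauto
      have hcond : ¬ (pvHead strs j ≠ ' ' ∧ pvGet2 idxs (j - 1) 1 = pvGet2 idxs j 0) := by
        tauto
      rw [List.filter_cons_of_pos hbool, List.foldl_cons]
      rw [show pvStepA idxs strs (acc, cs, pvGet2 idxs (j - 1) 1) j
            = (acc ++ [[cs, pvGet2 idxs (j - 1) 1]], pvGet2 idxs j 0, pvGet2 idxs j 1)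
          from by simp [pvStepA, hcond]]
      have := ih (j + 1) (by omega) (by omega)
        (acc ++ [[cs, pvGet2 idxs (j - 1) 1]]) (pvGet2 idxs j 0)
      simp only [show j + 1 - 1 = j by ring] at this
      rw [this]
      simp [pvBuild, List.append_assoc]
    · -- merge at j
      push Not at hb
      obtain ⟨hsp, heq⟩ := hb
      have hbool : pvNewGroup idxs strs j = false := by
        simp [pvNewGroup]
        exact ⟨hsp, heq⟩
      rw [List.filter_cons_of_neg (by simp [hbool]), List.foldl_cons]
      rw [show pvStepA idxs strs (acc, cs, pvGet2 idxs (j - 1) 1) j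
            = (acc, cs, pvGet2 idxs j 1)
          from by simp [pvStepA, hsp, heq]]
      have := ih (j + 1) (by omega) (by omega) acc cs
      simp only [show j + 1 - 1 = j by ring] at this
      rw [← this]

-- B's zip-of-boundaries construction produces the same grouped output
theorem buildB (idxs : List (List Int)) (n : Int) :
    ∀ (l : List Int) (s : Int),
    ((s :: l).zip (l ++ [n])).map (fun p => [pvGet2 idxs p.1 0, pvGet2 idxs (p.2 - 1) 1])
      = pvBuild idxs (n - 1) (pvGet2 idxs s 0) l := by
  intro l
  induction l with
  | nil => intro s; simp [pvBuild]
  | cons b rest ih =>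
    intro s
    simp only [List.cons_append, List.zip_cons_cons, List.map_cons, pvBuild]
    rw [ih b]

-- ===== VERDICT (by name: the statement is the Claim_ definition above) =====
theorem fix_indices_spec : Claim_equal_fix_indices := by
  intro idxs strs _ hpre
  obtain ⟨hne, -, -⟩ := hpre
  have hn1 : 1 ≤ idxs.length := List.length_pos_iff.mpr hne
  have hA := buildA idxs strs (idxs.length : Int) rfl (idxs.length - 1) 1
    (by omega) (by norm_num) [] (pvGet2 idxs 0 0)
  have hB := buildB idxs (idxs.length : Int)
    ((PySem.List.pyRange 1 (idxs.length : Int)).filter (pvNewGroup idxs strs)) 0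
  simp only [show (1 : Int) - 1 = 0 from rfl, List.nil_append] at hA
  exact hA.trans hB.symm
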